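-- pv_equiv track=rewrite | github.com/AlgoLeadMe/AlgoLeadMe-13 | froglike6/dp_digit/7786.py | f
-- ===== SOURCE A (Python) =====
-- def f(n):
--     total = 0
--     p = 1
--     while p <= n:
--         high = n // (p * 10)
--         cur  = (n // p) % 10
--         low  = n % p
--
--         total += high * 45 * p
--         total += (cur * (cur - 1) // 2) * p
--         total += cur * (low + 1)
--
--         p *= 10
--     return total
-- ===== SOURCE B (Python) =====
-- def f(n):
--     if n < 0:
--         return 0
--     q, r = divmod(n, 10)
--     s = 0
--     t = q
--     while t > 0:
--         s += t % 10
--         t //= 10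
--     return 10 * f(q - 1) + 45 * q + (r + 1) * s + r * (r + 1) // 2
-- ===== Notes on version B (the rewrite author's own statement) =====
-- stated objective: alternative
-- what changed: Replaced the bottom-up iterative place-value counting loop by a top-down recursion on the number with its last decimal digit removed (count digit sums of 0..n from the last digit plus a recursive call on the prefix), with an explicit digit-sum helper loop.
import Mathlib
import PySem

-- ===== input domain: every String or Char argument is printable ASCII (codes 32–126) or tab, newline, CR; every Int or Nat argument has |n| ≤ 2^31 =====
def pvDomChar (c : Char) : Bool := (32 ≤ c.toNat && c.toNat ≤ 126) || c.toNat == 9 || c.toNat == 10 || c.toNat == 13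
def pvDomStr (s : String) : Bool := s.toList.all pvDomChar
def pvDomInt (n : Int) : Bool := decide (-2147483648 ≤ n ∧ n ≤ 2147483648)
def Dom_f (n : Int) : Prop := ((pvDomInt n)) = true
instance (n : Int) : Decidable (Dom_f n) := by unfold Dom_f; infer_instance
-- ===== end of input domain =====

-- B replaces A's bottom-up iterative place-value counting loop by a top-down recursion on
-- the number with its last decimal digit removed; objective: alternative algorithm, not faster.

-- ===== PORT A =====
-- while p <= n: total += high*45*p + (cur*(cur-1)//2)*p + cur*(low+1); p *= 10
-- (the '1 ≤ p' conjunct only makes termination provable; p starts at 1 and only grows)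
def fLoop (n total p : Int) : Int :=
  if h : 1 ≤ p ∧ p ≤ n then
    fLoop n
      (total + PySem.Int.floordiv n (p * 10) * 45 * p
        + PySem.Int.floordiv
            (PySem.Int.mod (PySem.Int.floordiv n p) 10 *
              (PySem.Int.mod (PySem.Int.floordiv n p) 10 - 1)) 2 * p
        + PySem.Int.mod (PySem.Int.floordiv n p) 10 * (PySem.Int.mod n p + 1))
      (p * 10)
  else total
termination_by (n + 1 - p).toNat
decreasing_by
  have h1 : 1 ≤ p := h.1
  have h2 : p ≤ n := h.2
  omega

def f (n : Int) : Int := fLoop n 0 1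

-- ===== PORT B =====
-- while i > 0: s += i % 10; i //= 10
def digitSumLoop (i s : Int) : Int :=
  if h : 0 < i then
    digitSumLoop (PySem.Int.floordiv i 10) (s + PySem.Int.mod i 10)
  else s
termination_by i.toNat
decreasing_by
  have : PySem.Int.floordiv i 10 = i / 10 := PySem.Int.floordiv_eq_ediv_of_pos (by omega)
  rw [this]
  omega

-- if n < 0: return 0; q, r = divmod(n, 10); s = digit sum of q (the while loop above);
-- return 10*f(q-1) + 45*q + (r+1)*s + r*(r+1)//2
def f_alt (n : Int) : Int :=
  if _h : n < 0 then 0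
  else
    10 * f_alt (PySem.Int.floordiv n 10 - 1) + 45 * PySem.Int.floordiv n 10
      + (PySem.Int.mod n 10 + 1) * digitSumLoop (PySem.Int.floordiv n 10) 0
      + PySem.Int.floordiv (PySem.Int.mod n 10 * (PySem.Int.mod n 10 + 1)) 2
termination_by (n + 1).toNat
decreasing_by
  have e : PySem.Int.floordiv n 10 = n / 10 := PySem.Int.floordiv_eq_ediv_of_pos (by omega)
  rw [e]
  omega

-- ===== PRECONDITION & SPEC =====
def Spec_f (n : Int) (out : Int) : Prop := out = f_alt n
instance (n : Int) (out : Int) : Decidable (Spec_f n out) := by unfold Spec_f; infer_instance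

-- ===== CLAIM (what is proved, stated in full; the proofs are below) =====
def Claim_equal_f : Prop := ∀ (n : Int), Dom_f n → Spec_f n (f n)

-- ===== LEMMAS AND PROOFS =====

-- A's per-place term, written with Int.ediv/emod
def tt (n p : Int) : Int :=
  n / (p * 10) * 45 * p + (n / p % 10) * ((n / p % 10) - 1) / 2 * p
    + (n / p % 10) * (n % p + 1)

lemma fLoop_step (n t p : Int) (hp : 1 ≤ p) :
    fLoop n t p = if p ≤ n then fLoop n (t + tt n p) (p * 10) else t := by
  rw [fLoop]
  by_cases hpn : p ≤ n
  · simp only [hp, hpn, and_true, true_and, dif_pos, if_pos]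
    congr 1
    have e1 : PySem.Int.floordiv n (p * 10) = n / (p * 10) :=
      PySem.Int.floordiv_eq_ediv_of_pos (by omega)
    have e2 : PySem.Int.floordiv n p = n / p :=
      PySem.Int.floordiv_eq_ediv_of_pos (by omega)
    have e3 : PySem.Int.mod (n / p) 10 = n / p % 10 :=
      PySem.Int.mod_eq_emod_of_pos (by omega)
    have e4 : PySem.Int.mod n p = n % p :=
      PySem.Int.mod_eq_emod_of_pos (by omega)
    have e5 : PySem.Int.floordiv ((n / p % 10) * ((n / p % 10) - 1)) 2
        = (n / p % 10) * ((n / p % 10) - 1) / 2 :=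
      PySem.Int.floordiv_eq_ediv_of_pos (by omega)
    rw [e1, e2, e3, e4, e5, tt]
    ring
  · simp [hpn]

lemma tt_zero (n q : Int) (hn : 0 ≤ n) (hq : 1 ≤ q) (h : n < q) : tt n q = 0 := by
  have h1 : n / q = 0 := Int.ediv_eq_zero_of_lt hn h
  have h2 : n / (q * 10) = 0 := Int.ediv_eq_zero_of_lt hn (by nlinarith)
  simp [tt, h1, h2]

lemma fLoop_sum (n : Int) (hn : 0 ≤ n) (K : Nat) :
    ∀ p t : Int, 1 ≤ p → n < p * 10 ^ K →
      fLoop n t p = t + ∑ k ∈ Finset.range K, tt n (p * 10 ^ k) := by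
  induction K with
  | zero =>
    intro p t hp hb
    simp only [pow_zero, mul_one] at hb
    rw [fLoop_step n t p hp, if_neg (by omega)]
    simp
  | succ K ih =>
    intro p t hp hb
    rw [fLoop_step n t p hp]
    by_cases hpn : p ≤ n
    · rw [if_pos hpn]
      rw [ih (p * 10) (t + tt n p) (by omega) (by rw [pow_succ] at hb; linarith [hb])]
      rw [Finset.sum_range_succ']
      have : ∀ k, tt n (p * 10 ^ (k + 1)) = tt n (p * 10 * 10 ^ k) := by
        intro k; congr 1; ring
      simp only [this, pow_zero, mul_one]
      ring
    · rw [if_neg hpn]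
      have : ∑ k ∈ Finset.range (K + 1), tt n (p * 10 ^ k) = 0 := by
        apply Finset.sum_eq_zero
        intro k _
        apply tt_zero n _ hn (by nlinarith [one_le_pow₀ (show (1:Int) ≤ 10 by norm_num) (n := k)])
        have : p ≤ p * 10 ^ k := le_mul_of_one_le_right (by omega) (one_le_pow₀ (by omega))
        omega
      omega

lemma dsum_sum (K : Nat) :
    ∀ i s : Int, 0 ≤ i → i < 10 ^ K →
      digitSumLoop i s = s + ∑ k ∈ Finset.range K, i / 10 ^ k % 10 := by
  induction K with
  | zero =>
    intro i s h0 hb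
    rw [digitSumLoop]
    simp only [pow_zero] at hb
    rw [dif_neg (by omega)]
    simp
  | succ K ih =>
    intro i s h0 hb
    rw [digitSumLoop]
    by_cases hi : 0 < i
    · rw [dif_pos hi]
      have e1 : PySem.Int.floordiv i 10 = i / 10 :=
        PySem.Int.floordiv_eq_ediv_of_pos (by omega)
      have e2 : PySem.Int.mod i 10 = i % 10 :=
        PySem.Int.mod_eq_emod_of_pos (by omega)
      rw [e1, e2]
      rw [ih (i / 10) _ (by positivity) (by
        rw [Int.ediv_lt_iff_lt_mul (by omega)]
        rw [pow_succ] at hb; linarith)]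
      have hdd : ∀ k : Nat, i / 10 / 10 ^ k = i / 10 ^ (k + 1) := by
        intro k
        rw [Int.ediv_ediv_of_nonneg (by norm_num), ← pow_succ']
      simp only [hdd]
      rw [Finset.sum_range_succ']
      simp only [pow_zero, Int.ediv_one]
      ring
    · rw [dif_neg hi]
      have : i = 0 := by omega
      subst this
      simp

-- quotient/remainder extraction: (r + b*q)/b = q and (r + b*q)%b = r
lemma quot_of (b r q : Int) (hb : 0 < b) (h0 : 0 ≤ r) (h1 : r < b) :
    (r + b * q) / b = q := by
  rw [Int.add_mul_ediv_left _ _ (by omega), Int.ediv_eq_zero_of_lt h0 h1, zero_add]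

lemma rem_of (b r q : Int) (hb : 0 < b) (h0 : 0 ≤ r) (h1 : r < b) :
    (r + b * q) % b = r := by
  rw [Int.add_mul_emod_self_left, Int.emod_eq_of_lt h0 h1]

-- tt applied to an explicit base-(10,p) decomposition
lemma tt_decomp (p h c l : Int) (hp : 0 < p) (hc0 : 0 ≤ c) (hc9 : c < 10)
    (hl0 : 0 ≤ l) (hlp : l < p) :
    tt (10 * p * h + p * c + l) p = h * 45 * p + c * (c - 1) / 2 * p + c * (l + 1) := by
  have hr0 : 0 ≤ p * c + l := add_nonneg (mul_nonneg hp.le hc0) hl0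
  have hr1 : p * c + l < p * 10 := by nlinarith
  have e0 : (10 * p * h + p * c + l) / (p * 10) = h := by
    rw [show 10 * p * h + p * c + l = (p * c + l) + (p * 10) * h by ring]
    exact quot_of _ _ _ (by positivity) hr0 hr1
  have e1 : (10 * p * h + p * c + l) / p = c + 10 * h := by
    rw [show 10 * p * h + p * c + l = l + p * (c + 10 * h) by ring]
    exact quot_of _ _ _ hp hl0 hlp
  have e2 : (c + 10 * h) % 10 = c := rem_of 10 c h (by omega) hc0 hc9
  have e3 : (10 * p * h + p * c + l) % p = l := by
    rw [show 10 * p * h + p * c + l = l + p * (c + 10 * h) by ring]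
    exact rem_of _ _ _ hp hl0 hlp
  unfold tt
  rw [e0, e1, e2, e3]

-- x*(x-1) is even, so the '/2' is exact
lemma tri_mul (x : Int) : x * (x - 1) / 2 * 2 = x * (x - 1) := by
  apply Int.ediv_two_mul_two_of_even
  have h := Int.even_mul_succ_self (x - 1)
  have : (x - 1) * (x - 1 + 1) = x * (x - 1) := by ring
  rwa [this] at h

lemma tt_step (n p : Int) (hp : 1 ≤ p) (hn : 1 ≤ n) :
    tt n p = tt (n - 1) p + n / p % 10 := by
  have hp0 : 0 < p := by omega
  obtain ⟨h, c, l, hd, hc0, hc9, hl0, hlp⟩ :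
      ∃ h c l : Int, n = 10 * p * h + p * c + l ∧ 0 ≤ c ∧ c < 10 ∧ 0 ≤ l ∧ l < p := by
    refine ⟨n / (p * 10), n / p % 10, n % p, ?_, Int.emod_nonneg _ (by omega),
      Int.emod_lt_of_pos _ (by omega), Int.emod_nonneg _ (by omega),
      Int.emod_lt_of_pos _ hp0⟩
    have e := Int.ediv_add_emod n p
    have e2 := Int.ediv_add_emod (n / p) 10
    have e3 : n / p / 10 = n / (p * 10) := Int.ediv_ediv_of_nonneg (by omega)
    rw [e3] at e2
    linear_combination -e - p * e2
  have hcq : n / p % 10 = c := by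
    rw [show n = l + p * (c + 10 * h) by linear_combination hd,
      quot_of p l (c + 10 * h) hp0 hl0 hlp]
    exact rem_of 10 c h (by omega) hc0 hc9
  have A1 : tt n p = h * 45 * p + c * (c - 1) / 2 * p + c * (l + 1) := by
    have := tt_decomp p h c l hp0 hc0 hc9 hl0 hlp
    rwa [← hd] at this
  rw [hcq, A1]
  by_cases hll : 1 ≤ l
  · have B1 : tt (n - 1) p = h * 45 * p + c * (c - 1) / 2 * p + c * ((l - 1) + 1) := by
      have := tt_decomp p h c (l - 1) hp0 hc0 hc9 (by omega) (by omega)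
      rwa [show 10 * p * h + p * c + (l - 1) = n - 1 by linear_combination -hd] at this
    rw [B1]; ring
  · have hlz : l = 0 := by omega
    by_cases hcc : 1 ≤ c
    · have B1 : tt (n - 1) p
          = h * 45 * p + (c - 1) * ((c - 1) - 1) / 2 * p + (c - 1) * ((p - 1) + 1) := by
        have := tt_decomp p h (c - 1) (p - 1) hp0 (by omega) (by omega) (by omega) (by omega)
        rwa [show 10 * p * h + p * (c - 1) + (p - 1) = n - 1 by
          rw [hlz] at hd; linear_combination -hd] at this
      rw [B1, hlz]
      have t1 := tri_mul c
      have t2 := tri_mul (c - 1)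
      have hkey : c * (c - 1) / 2 = (c - 1) * ((c - 1) - 1) / 2 + (c - 1) := by
        have hx : c * (c - 1) - (c - 1) * (c - 1 - 1) = 2 * (c - 1) := by ring
        omega
      rw [hkey]; ring
    · have hcz : c = 0 := by omega
      rw [hcz, hlz] at hd
      have hh1 : 1 ≤ h := by nlinarith
      have B1 : tt (n - 1) p
          = (h - 1) * 45 * p + 9 * (9 - 1) / 2 * p + 9 * ((p - 1) + 1) := by
        have := tt_decomp p (h - 1) 9 (p - 1) hp0 (by omega) (by omega) (by omega) (by omega)
        rwa [show 10 * p * (h - 1) + p * 9 + (p - 1) = n - 1 by linear_combination -hd] at this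
      rw [B1, hcz]
      norm_num
      ring

lemma tt_eq_sum (p : Int) (hp : 1 ≤ p) (m : Nat) :
    tt (m : Int) p = ∑ i ∈ Finset.range (m + 1), ((i : Int) / p % 10) := by
  induction m with
  | zero =>
    have h0 : ((0:Nat):Int) = 0 := by norm_num
    rw [h0, tt_zero 0 p le_rfl hp (by omega)]
    simp
  | succ m ih =>
    rw [Finset.sum_range_succ, ← ih]
    push_cast
    rw [tt_step ((m : Int) + 1) p hp (by omega)]
    simp

-- the common specification: sum of the digit sums of 0..m
def S (m : Int) : Int := ∑ i ∈ Finset.range (m + 1).toNat, digitSumLoop (i : Int) 0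

lemma S_neg (m : Int) (h : m < 0) : S m = 0 := by
  unfold S
  rw [show (m + 1).toNat = 0 by omega]
  simp

lemma S_succ (m : Int) (h : 0 ≤ m) : S m = S (m - 1) + digitSumLoop m 0 := by
  unfold S
  rw [show (m + 1).toNat = (m - 1 + 1).toNat + 1 by omega, Finset.sum_range_succ]
  congr 1
  congr 1
  omega

theorem f_eq_S (n : Int) : f n = S n := by
  by_cases hn : 0 ≤ n
  · have hnM : n = ((n.toNat : Int)) := (Int.toNat_of_nonneg hn).symm
    have hK : n < 10 ^ (n.toNat + 1) := by
      have h1 : n.toNat < 10 ^ n.toNat := Nat.lt_pow_self (by norm_num)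
      have h2 : (10 : Nat) ^ n.toNat ≤ 10 ^ (n.toNat + 1) :=
        Nat.pow_le_pow_right (by norm_num) (by omega)
      rw [hnM]
      exact_mod_cast Nat.lt_of_lt_of_le h1 h2
    have hA : f n = ∑ k ∈ Finset.range (n.toNat + 1), tt n (10 ^ k) := by
      unfold f
      rw [fLoop_sum n hn (n.toNat + 1) 1 0 (by omega) (by simpa using hK)]
      simp
    have hB : S n = ∑ i ∈ Finset.range (n.toNat + 1), digitSumLoop (i : Int) 0 := by
      unfold S
      rw [show (n + 1).toNat = n.toNat + 1 by omega]
    rw [hA, hB]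
    have hdig : ∀ i ∈ Finset.range (n.toNat + 1),
        digitSumLoop (i : Int) 0
          = ∑ k ∈ Finset.range (n.toNat + 1), (i : Int) / 10 ^ k % 10 := by
      intro i hi
      rw [dsum_sum (n.toNat + 1) (i : Int) 0 (by positivity) (by
        have hin : (i : Int) ≤ n := by
          rw [hnM]; exact_mod_cast Nat.le_of_lt_succ (Finset.mem_range.mp hi)
        exact lt_of_le_of_lt hin hK)]
      simp
    rw [Finset.sum_congr rfl hdig, Finset.sum_comm]
    apply Finset.sum_congr rfl
    intro k _
    have := tt_eq_sum ((10 : Int) ^ k) (one_le_pow₀ (by norm_num)) n.toNat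
    rw [← hnM] at this
    exact this
  · push_neg at hn
    unfold f
    rw [fLoop_step n 0 1 le_rfl, if_neg (by omega)]
    rw [S_neg n hn]

-- r*(r+1) is even, so its '/2' is exact
lemma tri2_mul (x : Int) : x * (x + 1) / 2 * 2 = x * (x + 1) :=
  Int.ediv_two_mul_two_of_even (Int.even_mul_succ_self x)

-- dropping the last decimal digit splits the digit sum
lemma ds_split (q r : Int) (hq : 0 ≤ q) (hr0 : 0 ≤ r) (hr9 : r < 10) :
    digitSumLoop (10 * q + r) 0 = digitSumLoop q 0 + r := by
  have hK : q < 10 ^ (q.toNat + 1) := by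
    have h1 : q.toNat < 10 ^ q.toNat := Nat.lt_pow_self (by norm_num)
    have h2 : (10 : Nat) ^ q.toNat ≤ 10 ^ (q.toNat + 1) :=
      Nat.pow_le_pow_right (by norm_num) (by omega)
    rw [show q = ((q.toNat : Int)) from (Int.toNat_of_nonneg hq).symm]
    exact_mod_cast Nat.lt_of_lt_of_le h1 h2
  have hK2 : 10 * q + r < 10 ^ (q.toNat + 1 + 1) := by
    rw [pow_succ]
    nlinarith
  rw [dsum_sum (q.toNat + 1) q 0 hq hK, dsum_sum (q.toNat + 1 + 1) (10 * q + r) 0 (by omega) hK2]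
  rw [Finset.sum_range_succ']
  have hF0 : (10 * q + r) / 10 ^ 0 % 10 = r := by
    rw [pow_zero, Int.ediv_one, show 10 * q + r = r + 10 * q by ring]
    exact rem_of 10 r q (by omega) hr0 hr9
  have hFk : ∀ k : Nat, (10 * q + r) / 10 ^ (k + 1) % 10 = q / 10 ^ k % 10 := by
    intro k
    rw [pow_succ', ← Int.ediv_ediv_of_nonneg (show (0:Int) ≤ 10 by norm_num),
      show 10 * q + r = r + 10 * q by ring, quot_of 10 r q (by omega) hr0 hr9]
  simp only [hFk, hF0]
  ring

-- the recurrence B implements holds for the specification S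
lemma S_rec (k : Nat) : ∀ n : Int, 0 ≤ n → n.toNat = k →
    S n = 10 * S (n / 10 - 1) + 45 * (n / 10)
      + (n % 10 + 1) * digitSumLoop (n / 10) 0 + n % 10 * (n % 10 + 1) / 2 := by
  induction k using Nat.strong_induction_on with
  | _ k ih =>
    intro n hn hk
    by_cases h0 : n = 0
    · subst h0
      rw [S_succ 0 le_rfl, S_neg (0 - 1) (by omega), S_neg (0 / 10 - 1) (by omega),
        show (0 : Int) / 10 = 0 by norm_num, digitSumLoop,
        dif_neg (show ¬ (0 : Int) < 0 by omega)]
      norm_num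
    · have hn1 : 1 ≤ n := by omega
      have hsplit : n = 10 * (n / 10) + n % 10 := by omega
      have hq0 : 0 ≤ n / 10 := by omega
      have hds : digitSumLoop n 0 = digitSumLoop (n / 10) 0 + n % 10 := by
        conv_lhs => rw [hsplit]
        exact ds_split (n / 10) (n % 10) hq0 (by omega) (by omega)
      have hIH := ih (n - 1).toNat (by omega) (n - 1) (by omega) rfl
      rw [S_succ n hn, hIH, hds]
      by_cases hr : 1 ≤ n % 10
      · have e1 : (n - 1) / 10 = n / 10 := by omega
        have e2 : (n - 1) % 10 = n % 10 - 1 := by omega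
        rw [e1, e2]
        have t1 := tri2_mul (n % 10)
        have t2 := tri2_mul (n % 10 - 1)
        have hx : n % 10 * (n % 10 + 1) - (n % 10 - 1) * (n % 10 - 1 + 1)
            = 2 * (n % 10) := by ring
        have hkey : n % 10 * (n % 10 + 1) / 2
            = (n % 10 - 1) * (n % 10 - 1 + 1) / 2 + n % 10 := by omega
        rw [hkey]
        ring
      · have hrz : n % 10 = 0 := by omega
        have hq1 : 1 ≤ n / 10 := by omega
        have e1 : (n - 1) / 10 = n / 10 - 1 := by omega
        have e2 : (n - 1) % 10 = 9 := by omega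
        rw [e1, e2, hrz]
        have hSq : S (n / 10 - 1) = S (n / 10 - 1 - 1) + digitSumLoop (n / 10 - 1) 0 :=
          S_succ (n / 10 - 1) (by omega)
        rw [hSq]
        norm_num
        ring

theorem f_alt_eq_S (k : Nat) : ∀ n : Int, (n + 1).toNat = k → f_alt n = S n := by
  induction k using Nat.strong_induction_on with
  | _ k ih =>
    intro n hk
    rw [f_alt]
    by_cases hneg : n < 0
    · rw [dif_pos hneg, S_neg n hneg]
    · rw [dif_neg hneg]
      have e1 : PySem.Int.floordiv n 10 = n / 10 :=
        PySem.Int.floordiv_eq_ediv_of_pos (by omega)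
      have e2 : PySem.Int.mod n 10 = n % 10 :=
        PySem.Int.mod_eq_emod_of_pos (by omega)
      have e3 : PySem.Int.floordiv (n % 10 * (n % 10 + 1)) 2
          = n % 10 * (n % 10 + 1) / 2 :=
        PySem.Int.floordiv_eq_ediv_of_pos (by omega)
      rw [e1, e2, e3]
      rw [ih (n / 10 - 1 + 1).toNat (by omega) (n / 10 - 1) rfl]
      exact (S_rec n.toNat n (by omega) rfl).symm

theorem f_eq_f_alt (n : Int) : f n = f_alt n := by
  rw [f_eq_S n, f_alt_eq_S ((n + 1).toNat) n rfl]

-- ===== VERDICT (by name: the statement is the Claim_ definition above) =====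
theorem f_spec : Claim_equal_f := by
  intro n _
  unfold Spec_f
  exact f_eq_f_alt n
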